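-- pv_equiv track=rewrite | github.com/rbbratta/Redfish-Tools | doc-generator/doc_formatter/doc_formatter.py | exclude_prop_names
-- ===== SOURCE A (Python) =====
-- def exclude_prop_names(prop_names, props_to_exclude, props_to_exclude_by_match):
--     """Strip out excluded property names, and sort the remainder."""
--
--     # Strip out properties based on exact match:
--     prop_names = [x for x in prop_names if x not in props_to_exclude]
--
--     # Strip out properties based on partial match:
--     included_prop_names = []
--     for prop_name in prop_names:
--         excluded = False
--         for prop in props_to_exclude_by_match:
--             if prop in prop_name:
--                 excluded = True
--                 break
--         if not excluded:
--             included_prop_names.append(prop_name)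
--
--     included_prop_names.sort(key=str.lower)
--     return included_prop_names
-- ===== SOURCE B (Python) =====
-- def exclude_prop_names(prop_names, props_to_exclude, props_to_exclude_by_match):
--     """Strip out excluded property names, and sort the remainder."""
--     blocked = set(props_to_exclude)
--     result = []
--     for name in prop_names:
--         if name in blocked or any(p in name for p in props_to_exclude_by_match):
--             continue
--         # online stable insertion sort: place name before the first
--         # strictly greater entry (case-insensitive)
--         key = name.lower()
--         i = 0
--         while i < len(result) and result[i].lower() <= key:
--             i += 1
--         result.insert(i, name)
--     return result
-- ===== Notes on version B (the rewrite author's own statement) =====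
-- stated objective: alternative
-- what changed: Replaces A's two staged filter passes followed by a sort with a single online pass that skips excluded names (exact-match exclusion via a set instead of A's per-name list scan) and inserts each kept name directly into its case-insensitively sorted position in the accumulator (an incremental stable insertion sort).
import Mathlib
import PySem

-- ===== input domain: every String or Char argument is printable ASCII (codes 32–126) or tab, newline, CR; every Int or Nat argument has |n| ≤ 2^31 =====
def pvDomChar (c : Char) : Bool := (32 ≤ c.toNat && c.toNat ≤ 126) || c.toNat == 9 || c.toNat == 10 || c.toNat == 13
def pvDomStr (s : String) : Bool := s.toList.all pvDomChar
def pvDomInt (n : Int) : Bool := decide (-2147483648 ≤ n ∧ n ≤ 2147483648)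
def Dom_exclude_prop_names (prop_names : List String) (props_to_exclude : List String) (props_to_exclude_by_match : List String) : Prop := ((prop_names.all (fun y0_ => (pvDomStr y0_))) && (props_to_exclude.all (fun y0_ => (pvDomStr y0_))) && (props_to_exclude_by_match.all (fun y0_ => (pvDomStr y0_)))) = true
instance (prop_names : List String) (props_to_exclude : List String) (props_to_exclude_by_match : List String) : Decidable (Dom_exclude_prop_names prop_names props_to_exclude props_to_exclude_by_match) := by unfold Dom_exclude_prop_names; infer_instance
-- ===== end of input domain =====

-- B replaces A's two staged filter passes + final sort with a single online pass that
-- inserts each kept name into its sorted position (incremental stable insertion sort).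

-- ===== PORT A =====
-- the inner 'for prop in …: if prop in prop_name: excluded = True; break' loop
def pvInnerLoopA : List String → String → Bool
  | [], _ => false
  | p :: rest, name => if PySem.Str.isIn p name then true else pvInnerLoopA rest name

def exclude_prop_names (prop_names : List String) (props_to_exclude : List String) (props_to_exclude_by_match : List String) : List String :=
  -- prop_names = [x for x in prop_names if x not in props_to_exclude]
  let prop_names := prop_names.filter (fun x => !(props_to_exclude.contains x))
  -- build included_prop_names with the flag/break loop
  let included_prop_names := prop_names.foldl
    (fun acc prop_name =>
      if pvInnerLoopA props_to_exclude_by_match prop_name then acc else acc ++ [prop_name]) []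
  PySem.List.sorted included_prop_names (fun s => PySem.Str.lower s) false

-- ===== PORT B =====
-- the 'i = 0; while … <= key: i += 1; result.insert(i, name)' step: walk past every
-- entry whose lowercased form is ≤ key, insert before the first strictly greater one
def pvInsertLower (name : String) : List String → List String
  | [] => [name]
  | y :: ys =>
    if PySem.Str.lower y ≤ PySem.Str.lower name then y :: pvInsertLower name ys
    else name :: y :: ys

def exclude_prop_names_alt (prop_names : List String) (props_to_exclude : List String) (props_to_exclude_by_match : List String) : List String :=
  let blocked := PySem.Set.ofList props_to_exclude
  prop_names.foldl
    (fun result name =>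
      if blocked.contains name || props_to_exclude_by_match.any (fun p => PySem.Str.isIn p name)
      then result
      else pvInsertLower name result) []

-- ===== PRECONDITION & SPEC =====
def Spec_exclude_prop_names (prop_names : List String) (props_to_exclude : List String) (props_to_exclude_by_match : List String) (out : List String) : Prop := out = exclude_prop_names_alt prop_names props_to_exclude props_to_exclude_by_match
instance (prop_names : List String) (props_to_exclude : List String) (props_to_exclude_by_match : List String) (out : List String) : Decidable (Spec_exclude_prop_names prop_names props_to_exclude props_to_exclude_by_match out) := by unfold Spec_exclude_prop_names; infer_instance

-- ===== CLAIM (what is proved, stated in full; the proofs are below) =====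
def Claim_equal_exclude_prop_names : Prop := ∀ (prop_names : List String) (props_to_exclude : List String) (props_to_exclude_by_match : List String), Dom_exclude_prop_names prop_names props_to_exclude props_to_exclude_by_match → Spec_exclude_prop_names prop_names props_to_exclude props_to_exclude_by_match (exclude_prop_names prop_names props_to_exclude props_to_exclude_by_match)

-- ===== LEMMAS AND PROOFS =====
theorem pvInnerLoopA_eq_any (pm : List String) (name : String) :
    pvInnerLoopA pm name = pm.any (fun p => PySem.Str.isIn p name) := by
  induction pm with
  | nil => rfl
  | cons p rest ih =>
    by_cases h : PySem.Str.isIn p name = true <;>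
      simp [pvInnerLoopA, List.any_cons, ih, h]

theorem pvFoldA_eq_filter (pm : List String) (l : List String) (acc : List String) :
    l.foldl (fun acc prop_name =>
      if pvInnerLoopA pm prop_name then acc else acc ++ [prop_name]) acc
      = acc ++ l.filter (fun prop_name => !pvInnerLoopA pm prop_name) := by
  induction l generalizing acc with
  | nil => simp
  | cons x xs ih =>
    by_cases h : pvInnerLoopA pm x = true <;>
      simp [List.foldl_cons, h, ih]

-- my hand-written insertion equals PySem's insertBy with the strict lowercase order
theorem pvInsertLower_eq_insertBy (name : String) (l : List String) :
    pvInsertLower name l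
      = PySem.List.insertBy (fun a b => decide (PySem.Str.lower a < PySem.Str.lower b)) name l := by
  induction l with
  | nil => rfl
  | cons y ys ih =>
    by_cases h : PySem.Str.lower y ≤ PySem.Str.lower name <;>
      simp [pvInsertLower, PySem.List.insertBy, ih, h, not_lt.mpr, lt_of_not_ge]

-- a foldl that skips on a condition is the foldl over the filtered list
theorem pvFoldSkip_eq_foldl_filter {α β : Type} (c : α → Bool) (f : β → α → β)
    (l : List α) (acc : β) :
    l.foldl (fun acc x => if c x then acc else f acc x) acc
      = (l.filter (fun x => !c x)).foldl f acc := by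
  induction l generalizing acc with
  | nil => rfl
  | cons x xs ih =>
    by_cases h : c x = true <;> simp [List.foldl_cons, h, ih]

-- ===== VERDICT (by name: the statement is the Claim_ definition above) =====
theorem exclude_prop_names_spec : Claim_equal_exclude_prop_names := by
  intro pn pe pm _
  show _ = _
  simp only [exclude_prop_names, exclude_prop_names_alt]
  rw [pvFoldA_eq_filter, List.nil_append, List.filter_filter,
    pvFoldSkip_eq_foldl_filter]
  simp only [pvInsertLower_eq_insertBy]
  rw [← PySem.List.sorted_eq_foldl_insertBy]
  congr 1
  apply List.filter_congr
  intro x _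
  simp [pvInnerLoopA_eq_any, Bool.and_comm, PySem.Set.contains,
    PySem.Set.mem_ofList, List.contains_eq_mem]
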